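-- pv_equiv track=rewrite | github.com/JunweiLiang/Object_Detection_Tracking | enqueuer_thread.py | count_frame_get
-- ===== SOURCE A (Python) =====
-- def count_frame_get(total_frame, frame_gap):
--   count = 0
--   cur_frame = 0
--   while cur_frame < total_frame:
--     if cur_frame % frame_gap != 0:
--       cur_frame += 1
--       continue
--     count += 1
--     cur_frame += 1
--   return count
-- ===== SOURCE B (Python) =====
-- def count_frame_get(total_frame, frame_gap):
--   if total_frame <= 0:
--     return 0
--   g = abs(frame_gap)
--   return (total_frame + g - 1) // g
-- ===== Notes on version B (the rewrite author's own statement) =====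
-- stated objective: faster
-- what changed: Replaced the per-frame counting loop by the closed form ceil(total_frame/|frame_gap|) computed with one integer division.
import Mathlib
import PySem

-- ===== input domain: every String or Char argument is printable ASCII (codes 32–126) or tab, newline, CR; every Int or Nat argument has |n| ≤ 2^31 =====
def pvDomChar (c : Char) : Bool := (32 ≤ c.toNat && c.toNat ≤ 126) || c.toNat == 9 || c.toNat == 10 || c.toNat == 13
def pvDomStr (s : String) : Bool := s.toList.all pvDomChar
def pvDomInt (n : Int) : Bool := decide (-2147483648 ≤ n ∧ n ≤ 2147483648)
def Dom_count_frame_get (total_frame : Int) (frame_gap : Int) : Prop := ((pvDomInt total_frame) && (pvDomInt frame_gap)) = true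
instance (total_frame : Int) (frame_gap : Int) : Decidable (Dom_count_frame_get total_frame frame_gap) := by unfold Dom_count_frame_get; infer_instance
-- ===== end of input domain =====

-- B replaces A's per-frame counting loop by the closed form ceil(total_frame/|frame_gap|) (objective: faster).

-- ===== PORT A =====
-- the while loop of A: state (count, cur_frame), one recursive call per iteration
def pvLoopA (total_frame frame_gap count cur_frame : Int) : Int :=
  if _h : cur_frame < total_frame then
    if PySem.Int.mod cur_frame frame_gap ≠ 0 then
      pvLoopA total_frame frame_gap count (cur_frame + 1)
    else
      pvLoopA total_frame frame_gap (count + 1) (cur_frame + 1)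
  else count
termination_by (total_frame - cur_frame).toNat
decreasing_by all_goals omega

def count_frame_get (total_frame : Int) (frame_gap : Int) : Int :=
  pvLoopA total_frame frame_gap 0 0

-- ===== PORT B =====
def count_frame_get_alt (total_frame : Int) (frame_gap : Int) : Int :=
  if total_frame ≤ 0 then 0
  else PySem.Int.floordiv (total_frame + |frame_gap| - 1) |frame_gap|

-- ===== PRECONDITION & SPEC =====
-- Pre_ excludes exactly the inputs where Python A raises ZeroDivisionError:
-- frame_gap = 0 with total_frame > 0 (the loop body evaluates cur_frame % 0).
def Pre_count_frame_get (total_frame : Int) (frame_gap : Int) : Prop :=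
  frame_gap ≠ 0 ∨ total_frame ≤ 0
instance (total_frame : Int) (frame_gap : Int) : Decidable (Pre_count_frame_get total_frame frame_gap) := by unfold Pre_count_frame_get; infer_instance

def pvWitness_count_frame_get : Int × Int := (10, 3)

def Spec_count_frame_get (total_frame : Int) (frame_gap : Int) (out : Int) : Prop := out = count_frame_get_alt total_frame frame_gap
instance (total_frame : Int) (frame_gap : Int) (out : Int) : Decidable (Spec_count_frame_get total_frame frame_gap out) := by unfold Spec_count_frame_get; infer_instance

-- ===== CLAIM (what is proved, stated in full; the proofs are below) =====
def Claim_equal_count_frame_get : Prop := ∀ (total_frame : Int) (frame_gap : Int), Dom_count_frame_get total_frame frame_gap → Pre_count_frame_get total_frame frame_gap → Spec_count_frame_get total_frame frame_gap (count_frame_get total_frame frame_gap)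

-- ===== LEMMAS AND PROOFS =====

-- ceiling division step when m divides cur: the "+1 counted" case
lemma pvCeil_step_dvd (m cur : Int) (hm : 0 < m) (hd : m ∣ cur) :
    (cur + 1 + m - 1) / m = (cur + m - 1) / m + 1 := by
  obtain ⟨q, rfl⟩ := hd
  have a1 : (m * q + 1 + m - 1) / m = q + 1 := by
    have h : m * q + 1 + m - 1 = 0 + m * (q + 1) := by ring
    rw [h, Int.add_mul_ediv_left _ _ (by omega), Int.zero_ediv, zero_add]
  have a2 : (m * q + m - 1) / m = q := by
    have h : m * q + m - 1 = (m - 1) + m * q := by ring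
    rw [h, Int.add_mul_ediv_left _ _ (by omega),
        Int.ediv_eq_zero_of_lt (by omega) (by omega), zero_add]
  omega

-- ceiling division step when m does not divide cur (cur ≥ 0): the "skipped" case
lemma pvCeil_step_ndvd (m cur : Int) (hm : 0 < m) (hd : ¬ m ∣ cur) :
    (cur + 1 + m - 1) / m = (cur + m - 1) / m := by
  have hmod := Int.emod_add_mul_ediv cur m
  set r := cur % m with hr
  set q := cur / m with hq
  have hr0 : 0 ≤ r := Int.emod_nonneg cur (by omega)
  have hrm : r < m := Int.emod_lt_of_pos cur hm
  have hrne : r ≠ 0 := by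
    intro h0
    exact hd (Int.dvd_of_emod_eq_zero (by omega))
  have h1 : cur + 1 + m - 1 = (r + m) + m * q := by omega
  have h2 : cur + m - 1 = (r + m - 1) + m * q := by omega
  rw [h1, Int.add_mul_ediv_left _ _ (by omega), h2,
      Int.add_mul_ediv_left _ _ (by omega)]
  have e1 : (r + m) / m = 1 := by
    have h : r + m = r + m * 1 := by ring
    rw [h, Int.add_mul_ediv_left _ _ (by omega),
        Int.ediv_eq_zero_of_lt hr0 hrm, zero_add]
  have e2 : (r + m - 1) / m = 1 := by
    have h : r + m - 1 = (r - 1) + m * 1 := by ring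
    rw [h, Int.add_mul_ediv_left _ _ (by omega),
        Int.ediv_eq_zero_of_lt (by omega) (by omega), zero_add]
  omega

-- loop invariant: pvLoopA adds the number of multiples of |g| in [cur, total),
-- expressed as a difference of ceiling divisions
lemma pvLoopA_eq (g : Int) (hg : g ≠ 0) :
    ∀ (n : Nat) (total count cur : Int), 0 ≤ cur → cur ≤ total →
      (total - cur).toNat = n →
      pvLoopA total g count cur
        = count + ((total + |g| - 1) / |g| - (cur + |g| - 1) / |g|) := by
  intro n
  induction n with
  | zero =>
    intro total count cur hc hct hn
    have : total = cur := by omega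
    subst this
    rw [pvLoopA]
    simp
  | succ k ih =>
    intro total count cur hc hct hn
    have hlt : cur < total := by omega
    have hm : 0 < |g| := by positivity
    rw [pvLoopA]
    simp only [hlt, dite_true]
    have hmodiff : PySem.Int.mod cur g = 0 ↔ |g| ∣ cur := by
      rw [PySem.Int.mod_eq_zero_iff_dvd, abs_dvd]
    by_cases hd : |g| ∣ cur
    · have : ¬ PySem.Int.mod cur g ≠ 0 := by simp [hmodiff, hd]
      rw [if_neg this, ih total (count + 1) (cur + 1) (by omega) (by omega) (by omega),
          pvCeil_step_dvd |g| cur hm hd]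
      ring
    · have : PySem.Int.mod cur g ≠ 0 := by simp [hmodiff, hd]
      rw [if_pos this, ih total count (cur + 1) (by omega) (by omega) (by omega),
          pvCeil_step_ndvd |g| cur hm hd]

-- ===== VERDICT (by name: the statement is the Claim_ definition above) =====
theorem count_frame_get_spec : Claim_equal_count_frame_get := by
  intro total_frame frame_gap _hdom hpre
  unfold Spec_count_frame_get count_frame_get count_frame_get_alt
  by_cases ht : total_frame ≤ 0
  · rw [if_pos ht, pvLoopA]
    have h0t : ¬ ((0:Int) < total_frame) := by omega
    simp [h0t]
  · have hg : frame_gap ≠ 0 := by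
      rcases hpre with h | h
      · exact h
      · omega
    have hm : 0 < |frame_gap| := by positivity
    rw [if_neg ht,
        pvLoopA_eq frame_gap hg (total_frame - 0).toNat total_frame 0 0 le_rfl (by omega) rfl,
        PySem.Int.floordiv_eq_ediv_of_pos hm]
    have h0 : ((0:Int) + |frame_gap| - 1) / |frame_gap| = 0 :=
      Int.ediv_eq_zero_of_lt (by omega) (by omega)
    omega
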